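-- pv_equiv track=rewrite | github.com/ikenna-oluigbo/snefan | attribwalk.py | skip_visited
-- ===== SOURCE A (Python) =====
-- def skip_visited(snn, visited):
--     if len(snn) != 1:
--         if len(visited) > 1:
--             last_visit = visited[-2]
--             if last_visit in snn:
--                 snn.remove(last_visit)
--                 skip_visited(snn, visited)
--     return snn
-- ===== SOURCE B (Python) =====
-- def skip_visited(snn, visited):
--     # iterative rewrite: while-loop removal instead of tail recursion
--     if len(visited) > 1:
--         last_visit = visited[-2]
--         while len(snn) != 1 and last_visit in snn:
--             snn.remove(last_visit)
--     return snn
-- ===== Notes on version B (the rewrite author's own statement) =====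
-- stated objective: simpler
-- what changed: Replaces the tail recursion with a single while loop guarded by len(snn) != 1 and membership, hoisting the visited[-2] lookup out of the iteration.
import Mathlib
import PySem

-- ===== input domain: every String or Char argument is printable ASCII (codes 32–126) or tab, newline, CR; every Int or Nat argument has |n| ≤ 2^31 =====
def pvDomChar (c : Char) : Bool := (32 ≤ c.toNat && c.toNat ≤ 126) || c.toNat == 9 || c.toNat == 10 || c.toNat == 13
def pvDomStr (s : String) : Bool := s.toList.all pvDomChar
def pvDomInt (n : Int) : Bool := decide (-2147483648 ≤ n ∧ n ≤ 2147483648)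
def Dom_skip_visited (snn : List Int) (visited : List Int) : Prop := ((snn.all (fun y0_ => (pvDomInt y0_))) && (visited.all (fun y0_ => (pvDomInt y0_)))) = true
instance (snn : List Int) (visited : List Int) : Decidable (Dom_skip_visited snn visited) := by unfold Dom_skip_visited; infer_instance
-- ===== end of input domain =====

-- B replaces A's tail recursion by a single while loop with the visited[-2] lookup hoisted out (objective: simpler).
-- A mutates snn in place (remove); B performs the same mutation. The equivalence proved here is about the return value.

-- ===== PORT A =====
-- A: recursive; each step removes one occurrence of visited[-2] and recurses on the shortened list.
def skip_visited (snn : List Int) (visited : List Int) : List Int :=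
  if snn.length ≠ 1 then
    if visited.length > 1 then
      match PySem.List.pyGet? visited (-2) with
      | some last_visit =>
        if h : last_visit ∈ snn then
          -- snn.remove(last_visit); recursive call mutates snn further, so the return value is the recursion's result
          skip_visited (snn.erase last_visit) visited
        else snn
      | none => snn  -- unreachable: visited.length > 1 makes index -2 valid
    else snn
  else snn
termination_by snn.length
decreasing_by
  simpa [List.length_erase_of_mem h] using Nat.sub_lt (List.length_pos_of_mem h) Nat.one_pos

-- ===== PORT B =====
-- the while loop of Source B: guard is a conjunction, body removes one occurrence
def pvLoopB (snn : List Int) (last_visit : Int) : List Int :=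
  if h : snn.length ≠ 1 ∧ last_visit ∈ snn then
    pvLoopB (snn.erase last_visit) last_visit
  else snn
termination_by snn.length
decreasing_by
  simpa [List.length_erase_of_mem h.2] using Nat.sub_lt (List.length_pos_of_mem h.2) Nat.one_pos

def skip_visited_alt (snn : List Int) (visited : List Int) : List Int :=
  if visited.length > 1 then
    match PySem.List.pyGet? visited (-2) with
    | some last_visit => pvLoopB snn last_visit
    | none => snn  -- unreachable: visited.length > 1 makes index -2 valid
  else snn

-- ===== PRECONDITION & SPEC =====
def Spec_skip_visited (snn : List Int) (visited : List Int) (out : List Int) : Prop := out = skip_visited_alt snn visited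
instance (snn : List Int) (visited : List Int) (out : List Int) : Decidable (Spec_skip_visited snn visited out) := by unfold Spec_skip_visited; infer_instance

-- ===== CLAIM (what is proved, stated in full; the proofs are below) =====
def Claim_equal_skip_visited : Prop := ∀ (snn : List Int) (visited : List Int), Dom_skip_visited snn visited → Spec_skip_visited snn visited (skip_visited snn visited)

-- ===== LEMMAS AND PROOFS =====
theorem skip_eq_loop (visited : List Int) (lv : Int)
    (hv : visited.length > 1) (hg : PySem.List.pyGet? visited (-2) = some lv) :
    ∀ snn : List Int, skip_visited snn visited = pvLoopB snn lv := by
  have key : ∀ n (s : List Int), s.length ≤ n → skip_visited s visited = pvLoopB s lv := by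
    intro n
    induction n with
    | zero =>
      intro s hs
      have : s = [] := List.eq_nil_of_length_eq_zero (Nat.le_zero.mp hs)
      subst this
      rw [skip_visited, pvLoopB]
      simp [hv, hg]
    | succ n ih =>
      intro s hs
      rw [skip_visited, pvLoopB]
      by_cases hlen : s.length ≠ 1
      · rw [if_pos hlen, if_pos hv, hg]
        dsimp only
        by_cases hm : lv ∈ s
        · rw [dif_pos hm, dif_pos ⟨hlen, hm⟩]
          exact ih _ (by have := List.length_erase_of_mem hm; omega)
        · rw [dif_neg hm, dif_neg (fun h => hm h.2)]
      · rw [if_neg hlen, dif_neg (fun h => hlen h.1)]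
  exact fun snn => key snn.length snn le_rfl

-- ===== VERDICT (by name: the statement is the Claim_ definition above) =====
theorem skip_visited_spec : Claim_equal_skip_visited := by
  intro snn visited _
  unfold Spec_skip_visited skip_visited_alt
  by_cases hv : visited.length > 1
  · rw [if_pos hv]
    cases hg : PySem.List.pyGet? visited (-2) with
    | some lv => exact skip_eq_loop visited lv hv hg snn
    | none =>
      exfalso
      have := PySem.List.pyGet?_eq_none_iff (xs := visited) (i := -2) |>.mp hg
      simp [PySem.Raise.InRange] at this
      omega
  · rw [if_neg hv, skip_visited]
    by_cases hlen : snn.length ≠ 1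
    · rw [if_pos hlen, if_neg hv]
    · rw [if_neg hlen]
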